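-- pv_equiv track=rewrite | github.com/dsayan1708/Python | hotel_booking.py | hotel_booking
-- ===== SOURCE A (Python) =====
-- def hotel_booking(arr, dept, room):
--     event = [(t, 'RED') for t in arr] + [(t, "BLUE") for t in dept]
--     event = sorted(event)
--
--     guest = 0
--     for e in event:
--         if e[1] == 'RED':
--             guest+=1
--         else:
--             guest-=1
--
--         if guest > room:
--             return 'Sorry the rooms are full'
--     return 'Rooms available'
-- ===== SOURCE B (Python) =====
-- def hotel_booking(arr, dept, room):
--     arrivals = sorted(arr)
--     departures = sorted(dept)
--     guest = 0
--     i = 0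
--     j = 0
--     while i < len(arrivals):
--         if j < len(departures) and departures[j] <= arrivals[i]:
--             guest -= 1
--             j += 1
--         else:
--             guest += 1
--             i += 1
--             if guest > room:
--                 return 'Sorry the rooms are full'
--     return 'Rooms available'
-- ===== Notes on version B (the rewrite author's own statement) =====
-- stated objective: alternative
-- what changed: A decorates every time with a RED/BLUE string, sorts the combined tuple list and simulates every event; B sorts arrivals and departures separately as plain ints and sweeps them with two pointers, checking occupancy only at arrivals. Pre_ excludes negative room counts, a nonsensical corner where A can answer 'full' merely because the running count dips below a negative room on an early departure.
-- outside the precondition, e.g. on hotel_booking([10], [1, 2, 3], -2): A returns 'Sorry the rooms are full', B returns 'Rooms available'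
import Mathlib
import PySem

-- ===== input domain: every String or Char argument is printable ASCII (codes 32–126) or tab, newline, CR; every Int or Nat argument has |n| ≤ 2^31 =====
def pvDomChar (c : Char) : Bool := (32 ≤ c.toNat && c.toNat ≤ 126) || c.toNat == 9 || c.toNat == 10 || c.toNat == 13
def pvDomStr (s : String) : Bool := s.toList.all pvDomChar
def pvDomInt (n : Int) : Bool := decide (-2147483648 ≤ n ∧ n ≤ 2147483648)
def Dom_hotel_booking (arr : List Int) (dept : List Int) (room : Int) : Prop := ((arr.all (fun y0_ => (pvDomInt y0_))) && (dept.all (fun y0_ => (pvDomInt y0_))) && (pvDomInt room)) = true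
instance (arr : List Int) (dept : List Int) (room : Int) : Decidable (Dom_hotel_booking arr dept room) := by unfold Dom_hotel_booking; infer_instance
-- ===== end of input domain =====

-- B replaces A's sort-of-decorated-RED/BLUE-tuples simulation by sorting arrivals and
-- departures separately and sweeping them with two pointers, checking occupancy only at
-- arrivals (objective: alternative algorithm of the same asymptotic cost).

-- ===== PORT A =====
-- the 'for e in event: …' loop with its early return
def pvLoopA (room : Int) : List (Int × String) → Int → String
  | [], _ => "Rooms available"
  | e :: rest, guest =>
      let guest' := if e.2 = "RED" then guest + 1 else guest - 1
      if guest' > room then "Sorry the rooms are full" else pvLoopA room rest guest'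

def hotel_booking (arr : List Int) (dept : List Int) (room : Int) : String :=
  let event := arr.map (fun t => (t, "RED")) ++ dept.map (fun t => (t, "BLUE"))
  -- sorted(event) on (int, str) tuples = lexicographic tuple key (fst, snd)
  let event := PySem.List.sorted2 event Prod.fst Prod.snd false
  pvLoopA room event 0

-- ===== PORT B =====
-- Source B's 'while i < len(arrivals)' loop; the indices i, j are ported as the remaining
-- suffixes of the two sorted lists (exact: each is only ever advanced by one).
def pvLoopB (room : Int) : List Int → List Int → Int → String
  | [], _, _ => "Rooms available"
  | _ :: as, [], guest =>
      if guest + 1 > room then "Sorry the rooms are full" else pvLoopB room as [] (guest + 1)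
  | a :: as, d :: ds, guest =>
      if d ≤ a then pvLoopB room (a :: as) ds (guest - 1)
      else if guest + 1 > room then "Sorry the rooms are full"
      else pvLoopB room as (d :: ds) (guest + 1)
termination_by as ds => as.length + ds.length

def hotel_booking_alt (arr : List Int) (dept : List Int) (room : Int) : String :=
  let arrivals := PySem.List.sorted arr (fun x => x) false
  let departures := PySem.List.sorted dept (fun x => x) false
  pvLoopB room arrivals departures 0

-- ===== PRECONDITION & SPEC =====
-- Pre_ excludes negative room counts: a nonsensical corner where A can answer 'full'
-- merely because the running count dips below a negative room on an early departure,
-- while B, checking occupancy only at arrivals, answers 'available'.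
def Pre_hotel_booking (arr : List Int) (dept : List Int) (room : Int) : Prop := 0 ≤ room
instance (arr : List Int) (dept : List Int) (room : Int) : Decidable (Pre_hotel_booking arr dept room) := by unfold Pre_hotel_booking; infer_instance

def pvWitness_hotel_booking : List Int × List Int × Int := ([1, 3], [2], 1)

def Spec_hotel_booking (arr : List Int) (dept : List Int) (room : Int) (out : String) : Prop := out = hotel_booking_alt arr dept room
instance (arr : List Int) (dept : List Int) (room : Int) (out : String) : Decidable (Spec_hotel_booking arr dept room out) := by unfold Spec_hotel_booking; infer_instance

-- ===== CLAIM (what is proved, stated in full; the proofs are below) =====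
def Claim_equal_hotel_booking : Prop := ∀ (arr : List Int) (dept : List Int) (room : Int), Dom_hotel_booking arr dept room → Pre_hotel_booking arr dept room → Spec_hotel_booking arr dept room (hotel_booking arr dept room)

-- ===== LEMMAS AND PROOFS =====

-- Python's lexicographic order on (int, str) pairs
def pvLe (a b : Int × String) : Prop := a.1 < b.1 ∨ (a.1 = b.1 ∧ a.2 ≤ b.2)

-- the strict comparison sorted2 uses for the key pair (fst, snd)
def pvLt (a b : Int × String) : Bool :=
  decide (a.1 < b.1) || (!decide (b.1 < a.1) && decide (a.2 < b.2))

theorem pvLt_true {a b : Int × String} (h : pvLt a b = true) : pvLe a b := by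
  simp only [pvLt, Bool.or_eq_true, Bool.and_eq_true, Bool.not_eq_true', decide_eq_true_eq,
    decide_eq_false_iff_not] at h
  rcases h with h | ⟨h1, h2⟩
  · exact Or.inl h
  · rcases lt_trichotomy a.1 b.1 with h3 | h3 | h3
    · exact Or.inl h3
    · exact Or.inr ⟨h3, le_of_lt h2⟩
    · exact absurd h3 h1

theorem pvLt_false {a b : Int × String} (h : pvLt a b = false) : pvLe b a := by
  simp only [pvLt, Bool.or_eq_false_iff, Bool.and_eq_false_iff, Bool.not_eq_false',
    decide_eq_true_eq, decide_eq_false_iff_not] at h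
  obtain ⟨h1, h2⟩ := h
  rcases h2 with h2 | h2
  · exact Or.inl h2
  · rcases lt_trichotomy b.1 a.1 with h3 | h3 | h3
    · exact Or.inl h3
    · exact Or.inr ⟨h3, le_of_not_gt h2⟩
    · exact absurd h3 h1

theorem pvLe_trans {a b c : Int × String} (h : pvLe a b) (h' : pvLe b c) : pvLe a c := by
  rcases h with h | ⟨e, s⟩ <;> rcases h' with h' | ⟨e', s'⟩
  · exact Or.inl (h.trans h')
  · exact Or.inl (e' ▸ h)
  · exact Or.inl (e ▸ h')
  · exact Or.inr ⟨e.trans e', s.trans s'⟩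

theorem pvLe_antisymm {a b : Int × String} (h1 : pvLe a b) (h2 : pvLe b a) : a = b := by
  rcases h1 with h1 | ⟨e1, s1⟩
  · rcases h2 with h2 | ⟨e2, s2⟩
    · exact absurd h2 (lt_asymm h1)
    · exact absurd h1 (e2 ▸ lt_irrefl _)
  · rcases h2 with h2 | ⟨e2, s2⟩
    · exact absurd h2 (e1 ▸ lt_irrefl _)
    · exact Prod.ext e1 (le_antisymm s1 s2)

theorem pairwise_insertBy {x : Int × String} {ys : List (Int × String)}
    (h : List.Pairwise pvLe ys) :
    List.Pairwise pvLe (PySem.List.insertBy pvLt x ys) := by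
  induction ys with
  | nil => simp [PySem.List.insertBy]
  | cons y ys ih =>
      rw [PySem.List.insertBy]
      by_cases hb : pvLt x y
      · rw [if_pos hb]
        refine List.Pairwise.cons ?_ h
        intro z hz
        rcases List.mem_cons.mp hz with hz | hz
        · exact hz ▸ pvLt_true hb
        · exact pvLe_trans (pvLt_true hb) (List.rel_of_pairwise_cons h hz)
      · rw [if_neg hb]
        refine List.Pairwise.cons ?_ (ih (List.Pairwise.of_cons h))
        intro z hz
        rcases (PySem.List.mem_insertBy pvLt x z ys).mp hz with hz | hz
        · exact hz ▸ pvLt_false (Bool.of_not_eq_true hb)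
        · exact List.rel_of_pairwise_cons h hz

theorem sorted2_eq_foldl (xs : List (Int × String)) :
    PySem.List.sorted2 xs Prod.fst Prod.snd false
      = xs.foldl (fun acc x => PySem.List.insertBy pvLt x acc) [] := rfl

theorem pairwise_sorted2 (xs : List (Int × String)) :
    List.Pairwise pvLe (PySem.List.sorted2 xs Prod.fst Prod.snd false) := by
  rw [sorted2_eq_foldl]
  suffices h : ∀ (xs : List (Int × String)) (acc : List (Int × String)),
      List.Pairwise pvLe acc →
      List.Pairwise pvLe (xs.foldl (fun acc x => PySem.List.insertBy pvLt x acc) acc) from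
    h xs [] List.Pairwise.nil
  intro xs
  induction xs with
  | nil => intro acc h; exact h
  | cons x xs ih => intro acc h; exact ih _ (pairwise_insertBy h)

-- merge of the two sorted lists in the event order A's sort produces
def pvMrg : List Int → List Int → List (Int × String)
  | [], ds => ds.map (fun t => (t, "BLUE"))
  | a :: as, [] => (a, "RED") :: pvMrg as []
  | a :: as, d :: ds =>
      if d ≤ a then (d, "BLUE") :: pvMrg (a :: as) ds
      else (a, "RED") :: pvMrg as (d :: ds)
termination_by as ds => as.length + ds.length

theorem pvMrg_perm (as ds : List Int) :
    (pvMrg as ds).Perm (as.map (fun t => (t, "RED")) ++ ds.map (fun t => (t, "BLUE"))) := by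
  induction as, ds using pvMrg.induct with
  | case1 ds => simp [pvMrg]
  | case2 a as ih => rw [pvMrg]; simpa using List.Perm.cons (a, "RED") ih
  | case3 a as d ds hle ih =>
      rw [pvMrg, if_pos hle]
      refine List.Perm.trans (List.Perm.cons (d, "BLUE") ih) ?_
      exact List.perm_middle.symm
  | case4 a as d ds hle ih =>
      rw [pvMrg, if_neg hle]
      simpa using List.Perm.cons (a, "RED") ih

theorem mem_pvMrg {e : Int × String} {as ds : List Int} (h : e ∈ pvMrg as ds) :
    (∃ t ∈ as, e = (t, "RED")) ∨ (∃ t ∈ ds, e = (t, "BLUE")) := by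
  have := (pvMrg_perm as ds).mem_iff.mp h
  simp only [List.mem_append, List.mem_map] at this
  rcases this with ⟨t, ht, he⟩ | ⟨t, ht, he⟩
  · exact Or.inl ⟨t, ht, he.symm⟩
  · exact Or.inr ⟨t, ht, he.symm⟩

theorem pairwise_pvMrg {as ds : List Int}
    (ha : List.Pairwise (· ≤ ·) as) (hd : List.Pairwise (· ≤ ·) ds) :
    List.Pairwise pvLe (pvMrg as ds) := by
  induction as, ds using pvMrg.induct with
  | case1 ds =>
      rw [pvMrg]
      exact hd.map _ (fun a b hab => Or.elim (lt_or_eq_of_le hab)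
        (fun h => Or.inl h) (fun h => Or.inr ⟨h, le_refl _⟩))
  | case2 a as ih =>
      rw [pvMrg]
      refine List.Pairwise.cons ?_ (ih (List.Pairwise.of_cons ha) hd)
      intro e he
      rcases mem_pvMrg he with ⟨t, ht, rfl⟩ | ⟨t, ht, rfl⟩
      · rcases lt_or_eq_of_le (List.rel_of_pairwise_cons ha ht) with h | h
        · exact Or.inl h
        · exact Or.inr ⟨h, le_refl _⟩
      · simp at ht
  | case3 a as d ds hle ih =>
      rw [pvMrg, if_pos hle]
      refine List.Pairwise.cons ?_ (ih ha (List.Pairwise.of_cons hd))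
      intro e he
      rcases mem_pvMrg he with ⟨t, ht, rfl⟩ | ⟨t, ht, rfl⟩
      · have hdt : d ≤ t := by
          rcases List.mem_cons.mp ht with rfl | ht
          · exact hle
          · exact hle.trans (List.rel_of_pairwise_cons ha ht)
        rcases lt_or_eq_of_le hdt with h | h
        · exact Or.inl h
        · exact Or.inr ⟨h, by show ("BLUE" : String) ≤ "RED"; simp; decide⟩
      · rcases lt_or_eq_of_le (List.rel_of_pairwise_cons hd ht) with h | h
        · exact Or.inl h
        · exact Or.inr ⟨h, le_refl _⟩
  | case4 a as d ds hle ih =>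
      rw [pvMrg, if_neg hle]
      refine List.Pairwise.cons ?_ (ih (List.Pairwise.of_cons ha) hd)
      intro e he
      rcases mem_pvMrg he with ⟨t, ht, rfl⟩ | ⟨t, ht, rfl⟩
      · rcases lt_or_eq_of_le (List.rel_of_pairwise_cons ha ht) with h | h
        · exact Or.inl h
        · exact Or.inr ⟨h, le_refl _⟩
      · have hat : a < t := by
          rcases List.mem_cons.mp ht with rfl | ht
          · exact lt_of_not_ge hle
          · exact lt_of_lt_of_le (lt_of_not_ge hle) (List.rel_of_pairwise_cons hd ht)
        exact Or.inl hat

theorem sorted2_eq_pvMrg (arr dept : List Int) :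
    PySem.List.sorted2
        (arr.map (fun t => (t, "RED")) ++ dept.map (fun t => (t, "BLUE")))
        Prod.fst Prod.snd false
      = pvMrg (PySem.List.sorted arr (fun x => x) false)
              (PySem.List.sorted dept (fun x => x) false) := by
  refine List.Perm.eq_of_pairwise (fun a b _ _ h1 h2 => pvLe_antisymm h1 h2)
    (pairwise_sorted2 _)
    (pairwise_pvMrg ?_ ?_)
    ?_
  · simpa using PySem.List.sorted_pairwise arr (fun x => x)
  · simpa using PySem.List.sorted_pairwise dept (fun x => x)
  · refine List.Perm.trans (PySem.List.sorted2_perm _ _ _ _) ?_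
    refine List.Perm.symm ?_
    refine List.Perm.trans (pvMrg_perm _ _) ?_
    exact List.Perm.append
      (((PySem.List.sorted_perm arr (fun x => x) false).map _))
      (((PySem.List.sorted_perm dept (fun x => x) false).map _))

-- a run of departures never trips A's check while the count stays ≤ room + 1
theorem pvBlue (ds : List Int) :
    ∀ (g room : Int), g ≤ room + 1 →
      pvLoopA room (ds.map (fun t => (t, "BLUE"))) g = "Rooms available" := by
  induction ds with
  | nil => intro g room _; simp [pvLoopA]
  | cons d ds ih =>
      intro g room h
      simp only [List.map_cons, pvLoopA, String.reduceEq, reduceIte, gt_iff_lt]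
      rw [if_neg (by omega)]
      exact ih (g - 1) room (by omega)

-- invariant g ≤ room + 1: A's sweep over the merged event list equals B's two-pointer sweep
theorem pvKey (as ds : List Int) :
    ∀ (g room : Int), g ≤ room + 1 →
      pvLoopA room (pvMrg as ds) g = pvLoopB room as ds g := by
  induction as, ds using pvMrg.induct with
  | case1 ds =>
      intro g room h
      rw [pvMrg, pvLoopB.eq_def]
      exact pvBlue ds g room h
  | case2 a as ih =>
      intro g room h
      rw [pvMrg, pvLoopB]
      simp only [pvLoopA, reduceIte, gt_iff_lt]
      by_cases hf : room < g + 1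
      · rw [if_pos hf, if_pos hf]
      · rw [if_neg hf, if_neg hf]
        exact ih (g + 1) room (by omega)
  | case3 a as d ds hle ih =>
      intro g room h
      rw [pvMrg, if_pos hle, pvLoopB, if_pos hle]
      simp only [pvLoopA, String.reduceEq, reduceIte, gt_iff_lt]
      rw [if_neg (by omega)]
      exact ih (g - 1) room (by omega)
  | case4 a as d ds hle ih =>
      intro g room h
      rw [pvMrg, if_neg hle, pvLoopB, if_neg hle]
      simp only [pvLoopA, reduceIte, gt_iff_lt]
      by_cases hf : room < g + 1
      · rw [if_pos hf, if_pos hf]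
      · rw [if_neg hf, if_neg hf]
        exact ih (g + 1) room (by omega)

-- ===== VERDICT (by name: the statement is the Claim_ definition above) =====
theorem hotel_booking_spec : Claim_equal_hotel_booking := by
  intro arr dept room _ hpre
  exact (congrArg (fun E => pvLoopA room E 0) (sorted2_eq_pvMrg arr dept)).trans
    (pvKey _ _ 0 room (by unfold Pre_hotel_booking at hpre; omega))
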